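-- pv_equiv track=rewrite | github.com/jhernand8/news | hnproj/topstoriesviews.py | filter_stories_for_top_urls
-- ===== SOURCE A (Python) =====
-- def filter_stories_for_top_urls(stories):
--   urls = get_top_url_strings()
--   filtered = []
--   for story in stories:
--     url = story.get('url')
--     is_top = False
--     for topurl in urls:
--       if url and url.find(topurl) != -1:
--         is_top = True
--         break
--     if is_top:
--       filtered.append(story)
--   return filtered
--
-- def get_top_url_strings():
--   urls = ["washingtonpost.com",
--           "nytimes.com",
--           "newyorker.com",
--           "techcrunch.com",
--           "greatist.com",
--           "neal.is",
--           "randsinrepose.com",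
--           "arstechnica.com",
--           "lifehacker.com",
--           "kickstarter.com",
--           "npr.org",
--           "bbc.com",
--           "sfgate.com",
--           "economist.com",
--           "jasonshen.com",
--           "rickyyean.com",
--           "mercurynews.com"
--          ];
--   return urls;
-- ===== SOURCE B (Python) =====
-- def get_top_url_strings():
--   urls = ["washingtonpost.com",
--           "nytimes.com",
--           "newyorker.com",
--           "techcrunch.com",
--           "greatist.com",
--           "neal.is",
--           "randsinrepose.com",
--           "arstechnica.com",
--           "lifehacker.com",
--           "kickstarter.com",
--           "npr.org",
--           "bbc.com",
--           "sfgate.com",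
--           "economist.com",
--           "jasonshen.com",
--           "rickyyean.com",
--           "mercurynews.com"
--          ]
--   return urls
--
--
-- def filter_stories_for_top_urls(stories):
--   # Pattern-major traversal: for each top url, mark the indices of the stories
--   # whose url contains it; then emit the marked stories in one ordered pass.
--   matched = set()
--   for topurl in get_top_url_strings():
--     for i, story in enumerate(stories):
--       if i not in matched:
--         url = story.get('url')
--         if url and topurl in url:
--           matched.add(i)
--   return [story for i, story in enumerate(stories) if i in matched]
-- ===== Notes on version B (the rewrite author's own statement) =====
-- stated objective: alternative
-- what changed: B interchanges the loops: it traverses pattern-major, recording the indices of matched stories in a set, and then emits the matched stories in one ordered pass, instead of A's story-major scan with a per-story flag, break and url.find.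
import Mathlib
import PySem

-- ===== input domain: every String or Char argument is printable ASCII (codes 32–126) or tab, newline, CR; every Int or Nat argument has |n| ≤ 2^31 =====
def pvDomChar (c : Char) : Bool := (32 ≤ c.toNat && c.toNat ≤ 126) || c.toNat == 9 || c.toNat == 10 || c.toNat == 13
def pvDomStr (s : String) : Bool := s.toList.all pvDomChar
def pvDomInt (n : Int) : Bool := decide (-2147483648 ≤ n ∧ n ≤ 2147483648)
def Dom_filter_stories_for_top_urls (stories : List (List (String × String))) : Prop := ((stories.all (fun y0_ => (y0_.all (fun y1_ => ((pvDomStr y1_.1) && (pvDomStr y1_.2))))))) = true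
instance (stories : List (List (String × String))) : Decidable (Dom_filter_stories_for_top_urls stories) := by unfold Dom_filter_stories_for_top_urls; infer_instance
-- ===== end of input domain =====

-- B replaces A's story-major scan (per-story flag, break, url.find) by a pattern-major
-- traversal that records matched story indices in a set and then emits the matched
-- stories in one ordered pass; same cost, genuinely different traversal (objective: alternative).

-- ===== PORT A =====
def get_top_url_strings : List String :=
  ["washingtonpost.com", "nytimes.com", "newyorker.com", "techcrunch.com",
   "greatist.com", "neal.is", "randsinrepose.com", "arstechnica.com",
   "lifehacker.com", "kickstarter.com", "npr.org", "bbc.com", "sfgate.com",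
   "economist.com", "jasonshen.com", "rickyyean.com", "mercurynews.com"]

-- literal port of A; the inner 'for … break' only ever sets the flag to true, so the
-- break-free fold over the same state computes the same flag
def filter_stories_for_top_urls (stories : List (List (String × String))) : List (List (String × String)) :=
  let urls := get_top_url_strings
  stories.foldl (fun filtered story =>
    let url := (PySem.Dict.mk story).get? "url"
    let is_top := urls.foldl (fun is_top topurl =>
      if (match url with
          | some s => !s.toList.isEmpty && (PySem.Str.find s topurl != -1)
          | none   => false)
      then true else is_top) false
    if is_top then filtered ++ [story] else filtered) []

-- ===== PORT B =====
def filter_stories_for_top_urls_alt (stories : List (List (String × String))) : List (List (String × String)) :=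
  let matched : PySem.Set Int :=
    get_top_url_strings.foldl (fun matched topurl =>
      (PySem.List.enumerate stories).foldl (fun matched p =>
        if PySem.Set.contains matched p.1 then matched
        else
          match (PySem.Dict.mk p.2).get? "url" with
          | some url =>
              if !url.toList.isEmpty && PySem.Str.isIn topurl url then
                PySem.Set.add matched p.1
              else matched
          | none => matched) matched) PySem.Set.empty
  (PySem.List.enumerate stories).foldl (fun out p =>
    if PySem.Set.contains matched p.1 then out ++ [p.2] else out) []

-- ===== PRECONDITION & SPEC =====
def Spec_filter_stories_for_top_urls (stories : List (List (String × String))) (out : List (List (String × String))) : Prop := out = filter_stories_for_top_urls_alt stories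
instance (stories : List (List (String × String))) (out : List (List (String × String))) : Decidable (Spec_filter_stories_for_top_urls stories out) := by unfold Spec_filter_stories_for_top_urls; infer_instance

-- ===== CLAIM (what is proved, stated in full; the proofs are below) =====
def Claim_equal_filter_stories_for_top_urls : Prop := ∀ (stories : List (List (String × String))), Dom_filter_stories_for_top_urls stories → Spec_filter_stories_for_top_urls stories (filter_stories_for_top_urls stories)


-- ===== LEMMAS AND PROOFS =====

-- the per-(pattern, story) test both programs make, in B's ('in'-based) form
def pvChk (topurl : String) (story : List (String × String)) : Bool :=
  match (PySem.Dict.mk story).get? "url" with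
  | some url => !url.toList.isEmpty && PySem.Str.isIn topurl url
  | none => false

def pvHit (story : List (String × String)) : Bool :=
  get_top_url_strings.any (fun t => pvChk t story)

lemma find_bne_eq_isIn (s t : String) : (PySem.Str.find s t != -1) = PySem.Str.isIn t s := by
  rw [Bool.eq_iff_iff, bne_iff_ne]
  rw [PySem.Str.find_ne_neg_one_iff]
  exact (PySem.Str.isIn_iff_infix t s).symm

lemma chkA_eq (story : List (String × String)) (t : String) :
    (match (PySem.Dict.mk story).get? "url" with
      | some s => !s.toList.isEmpty && (PySem.Str.find s t != -1)
      | none   => false)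
      = pvChk t story := by
  unfold pvChk
  cases h : (PySem.Dict.mk story).get? "url" with
  | none => rfl
  | some s =>
    show (!s.toList.isEmpty && (PySem.Str.find s t != -1)) = (!s.toList.isEmpty && PySem.Str.isIn t s)
    rw [find_bne_eq_isIn]

lemma isTop_eq (story : List (String × String)) :
    get_top_url_strings.foldl (fun is_top topurl =>
      if (match (PySem.Dict.mk story).get? "url" with
          | some s => !s.toList.isEmpty && (PySem.Str.find s topurl != -1)
          | none   => false)
      then true else is_top) false = pvHit story := by
  have h1 : get_top_url_strings.foldl (fun is_top topurl =>
      if (match (PySem.Dict.mk story).get? "url" with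
          | some s => !s.toList.isEmpty && (PySem.Str.find s topurl != -1)
          | none   => false)
      then true else is_top) false
      = get_top_url_strings.foldl (fun is_top topurl =>
          if pvChk topurl story then true else is_top) false := by
    apply PySem.List.foldl_congr_mem
    intro acc t _
    rw [chkA_eq story t]
  rw [h1, PySem.List.foldl_if_true_eq]
  simp [pvHit]

lemma A_eq_filter (stories : List (List (String × String))) :
    filter_stories_for_top_urls stories = stories.filter pvHit := by
  show stories.foldl (fun filtered story =>
      if (get_top_url_strings.foldl (fun is_top topurl =>
            if (match (PySem.Dict.mk story).get? "url" with
                | some s => !s.toList.isEmpty && (PySem.Str.find s topurl != -1)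
                | none   => false)
            then true else is_top) false)
      then filtered ++ [story] else filtered) [] = stories.filter pvHit
  have h1 : stories.foldl (fun filtered story =>
      if (get_top_url_strings.foldl (fun is_top topurl =>
            if (match (PySem.Dict.mk story).get? "url" with
                | some s => !s.toList.isEmpty && (PySem.Str.find s topurl != -1)
                | none   => false)
            then true else is_top) false)
      then filtered ++ [story] else filtered) []
      = stories.foldl (fun filtered story =>
          if pvHit story then filtered ++ [story] else filtered) [] := by
    apply PySem.List.foldl_congr_mem
    intro acc story _
    rw [isTop_eq story]
  rw [h1, PySem.List.foldl_append_if_eq_filter]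
  simp

-- B's inner (per-pattern) loop, membership characterisation
lemma mem_inner (t : String) (l : List (Int × List (String × String)))
    (m : PySem.Set Int) (y : Int) :
    (y ∈ l.foldl (fun matched p =>
        if PySem.Set.contains matched p.1 then matched
        else
          match (PySem.Dict.mk p.2).get? "url" with
          | some url =>
              if !url.toList.isEmpty && PySem.Str.isIn t url then
                PySem.Set.add matched p.1
              else matched
          | none => matched) m)
      ↔ (y ∈ m ∨ ∃ p ∈ l, p.1 = y ∧ pvChk t p.2 = true) := by
  induction l generalizing m with
  | nil => simp
  | cons p l ih =>
    have hstep : (if PySem.Set.contains m p.1 then m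
        else
          match (PySem.Dict.mk p.2).get? "url" with
          | some url =>
              if !url.toList.isEmpty && PySem.Str.isIn t url then
                PySem.Set.add m p.1
              else m
          | none => m)
        = (if PySem.Set.contains m p.1 then m
           else if pvChk t p.2 then PySem.Set.add m p.1 else m) := by
      unfold pvChk
      cases h : (PySem.Dict.mk p.2).get? "url" <;> simp
    simp only [List.foldl_cons, hstep]
    by_cases hc : PySem.Set.contains m p.1 = true
    · rw [if_pos hc, ih]
      have hcm : p.1 ∈ m := by rw [← PySem.Set.contains_iff]; exact hc
      constructor
      · rintro (hy | hy)
        · exact Or.inl hy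
        · exact Or.inr ⟨_, List.mem_cons_of_mem _ hy.choose_spec.1, hy.choose_spec.2⟩
      · rintro (hy | ⟨q, hq, h1, h2⟩)
        · exact Or.inl hy
        · rcases List.mem_cons.mp hq with rfl | hq'
          · exact Or.inl (h1 ▸ hcm)
          · exact Or.inr ⟨q, hq', h1, h2⟩
    · rw [if_neg hc]
      by_cases hk : pvChk t p.2 = true
      · rw [if_pos hk, ih]
        constructor
        · rintro (hy | hy)
          · rw [PySem.Set.mem_add] at hy
            rcases hy with hy' | rfl
            · exact Or.inl hy'
            · exact Or.inr ⟨p, List.mem_cons_self .., rfl, hk⟩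
          · exact Or.inr ⟨_, List.mem_cons_of_mem _ hy.choose_spec.1, hy.choose_spec.2⟩
        · rintro (hy | ⟨q, hq, h1, h2⟩)
          · exact Or.inl (by rw [PySem.Set.mem_add]; exact Or.inl hy)
          · rcases List.mem_cons.mp hq with rfl | hq'
            · exact Or.inl (by rw [PySem.Set.mem_add]; exact Or.inr h1.symm)
            · exact Or.inr ⟨q, hq', h1, h2⟩
      · rw [if_neg hk, ih]
        constructor
        · rintro (hy | hy)
          · exact Or.inl hy
          · exact Or.inr ⟨_, List.mem_cons_of_mem _ hy.choose_spec.1, hy.choose_spec.2⟩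
        · rintro (hy | ⟨q, hq, h1, h2⟩)
          · exact Or.inl hy
          · rcases List.mem_cons.mp hq with rfl | hq'
            · exact absurd h2 hk
            · exact Or.inr ⟨q, hq', h1, h2⟩

-- B's outer (over the pattern list) loop, membership characterisation
lemma mem_outer (stories : List (List (String × String))) (ts : List String)
    (m : PySem.Set Int) (y : Int) :
    (y ∈ ts.foldl (fun matched topurl =>
        (PySem.List.enumerate stories).foldl (fun matched p =>
          if PySem.Set.contains matched p.1 then matched
          else
            match (PySem.Dict.mk p.2).get? "url" with
            | some url =>
                if !url.toList.isEmpty && PySem.Str.isIn topurl url then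
                  PySem.Set.add matched p.1
                else matched
            | none => matched) matched) m)
      ↔ (y ∈ m ∨ ∃ t ∈ ts, ∃ p ∈ PySem.List.enumerate stories, p.1 = y ∧ pvChk t p.2 = true) := by
  induction ts generalizing m with
  | nil => simp
  | cons t ts ih =>
    simp only [List.foldl_cons]
    rw [ih, mem_inner]
    constructor
    · rintro ((hy | ⟨p, hp, h1, h2⟩) | ⟨u, hu, hrest⟩)
      · exact Or.inl hy
      · exact Or.inr ⟨t, List.mem_cons_self .., p, hp, h1, h2⟩
      · exact Or.inr ⟨u, List.mem_cons_of_mem _ hu, hrest⟩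
    · rintro (hy | ⟨u, hu, hrest⟩)
      · exact Or.inl (Or.inl hy)
      · rcases List.mem_cons.mp hu with rfl | hu'
        · exact Or.inl (Or.inr hrest)
        · exact Or.inr ⟨u, hu', hrest⟩

-- B's final ordered pass: emitting the elements whose index is marked
lemma final_pass {α : Type} (M : PySem.Set Int) (q : α → Bool) :
    ∀ (l : List α) (s : Int) (acc : List α),
      (∀ p ∈ PySem.List.enumerate l s, PySem.Set.contains M p.1 = q p.2) →
      (PySem.List.enumerate l s).foldl (fun out p =>
        if PySem.Set.contains M p.1 then out ++ [p.2] else out) acc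
        = acc ++ l.filter q := by
  intro l
  induction l with
  | nil => intro s acc h; simp
  | cons x l ih =>
    intro s acc h
    have hx : PySem.Set.contains M s = q x := by
      have := h (s, x) (by rw [PySem.List.enumerate_cons]; exact List.mem_cons_self ..)
      exact this
    have htl : ∀ p ∈ PySem.List.enumerate l (s + 1), PySem.Set.contains M p.1 = q p.2 := by
      intro p hp
      exact h p (by rw [PySem.List.enumerate_cons]; exact List.mem_cons_of_mem _ hp)
    rw [PySem.List.enumerate_cons, List.foldl_cons]
    have hF : (if PySem.Set.contains M (s, x).1 = true then acc ++ [(s, x).2] else acc)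
        = (if q x = true then acc ++ [x] else acc) := by
      show (if PySem.Set.contains M s = true then acc ++ [x] else acc)
          = (if q x = true then acc ++ [x] else acc)
      rw [hx]
    rw [hF]
    by_cases hq : q x = true
    · rw [if_pos hq, ih (s + 1) (acc ++ [x]) htl]
      simp [List.filter_cons, hq]
    · rw [if_neg hq, ih (s + 1) acc htl]
      simp [List.filter_cons, hq]

lemma B_eq_filter (stories : List (List (String × String))) :
    filter_stories_for_top_urls_alt stories = stories.filter pvHit := by
  show (PySem.List.enumerate stories).foldl (fun out p =>
      if PySem.Set.contains
        (get_top_url_strings.foldl (fun matched topurl =>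
          (PySem.List.enumerate stories).foldl (fun matched p =>
            if PySem.Set.contains matched p.1 then matched
            else
              match (PySem.Dict.mk p.2).get? "url" with
              | some url =>
                  if !url.toList.isEmpty && PySem.Str.isIn topurl url then
                    PySem.Set.add matched p.1
                  else matched
              | none => matched) matched) PySem.Set.empty) p.1
      then out ++ [p.2] else out) [] = stories.filter pvHit
  have hM : ∀ p ∈ PySem.List.enumerate stories, PySem.Set.contains
        (get_top_url_strings.foldl (fun matched topurl =>
          (PySem.List.enumerate stories).foldl (fun matched p =>
            if PySem.Set.contains matched p.1 then matched
            else
              match (PySem.Dict.mk p.2).get? "url" with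
              | some url =>
                  if !url.toList.isEmpty && PySem.Str.isIn topurl url then
                    PySem.Set.add matched p.1
                  else matched
              | none => matched) matched) PySem.Set.empty) p.1 = pvHit p.2 := by
    intro p hp
    rw [PySem.List.mem_enumerate_iff] at hp
    rcases hp with ⟨k, hk, rfl⟩
    rw [Bool.eq_iff_iff, PySem.Set.contains_iff, mem_outer]
    constructor
    · rintro (hy | ⟨t, ht, q, hq, h1, h2⟩)
      · simp [PySem.Set.empty] at hy
      · rw [PySem.List.mem_enumerate_iff] at hq
        rcases hq with ⟨j, hj, rfl⟩
        have hjk : j = k := by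
          have h1' : ((0 : Int) + (j : Int)) = ((0 : Int) + (k : Int)) := h1
          omega
        subst hjk
        show pvHit stories[j] = true
        unfold pvHit
        rw [List.any_eq_true]
        exact ⟨t, ht, h2⟩
    · intro h
      have h' : pvHit stories[k] = true := h
      unfold pvHit at h'
      rw [List.any_eq_true] at h'
      rcases h' with ⟨t, ht, h2⟩
      refine Or.inr ⟨t, ht, ((0 : Int) + (k : Int), stories[k]), ?_, rfl, h2⟩
      rw [PySem.List.mem_enumerate_iff]
      exact ⟨k, hk, rfl⟩
  have := final_pass (get_top_url_strings.foldl (fun matched topurl =>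
          (PySem.List.enumerate stories).foldl (fun matched p =>
            if PySem.Set.contains matched p.1 then matched
            else
              match (PySem.Dict.mk p.2).get? "url" with
              | some url =>
                  if !url.toList.isEmpty && PySem.Str.isIn topurl url then
                    PySem.Set.add matched p.1
                  else matched
              | none => matched) matched) PySem.Set.empty) pvHit stories 0 [] hM
  simpa using this

-- ===== VERDICT (by name: the statement is the Claim_ definition above) =====
theorem filter_stories_for_top_urls_spec : Claim_equal_filter_stories_for_top_urls := by
  intro stories _
  show filter_stories_for_top_urls stories = filter_stories_for_top_urls_alt stories
  rw [A_eq_filter, B_eq_filter]
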